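-- pv_equiv track=rewrite | github.com/kkazensk/bach-to-the-future | train_1.py | prepare_sequences
-- ===== SOURCE A (Python) =====
-- def prepare_sequences(all_notes_durations, sequence_length, note_to_int, duration_to_int):
--     """Prepare sequences for input and output."""
--     inputs = []
--     outputs_pitch = []
--     outputs_dur = []
--
--     for i in range(len(all_notes_durations) - sequence_length):
--         seq_in = all_notes_durations[i:i+sequence_length]
--         seq_out = all_notes_durations[i+sequence_length]
--
--         inputs.append([note_to_int[note] for note, dur in seq_in])
--         outputs_pitch.append(note_to_int[seq_out[0]])
--         outputs_dur.append(duration_to_int[str(seq_out[1])])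
--
--     return inputs, outputs_pitch, outputs_dur
-- ===== SOURCE B (Python) =====
-- def prepare_sequences(all_notes_durations, sequence_length, note_to_int, duration_to_int):
--     """Prepare sequences for input and output."""
--     n = len(all_notes_durations)
--     if sequence_length < 0 or n <= sequence_length:
--         return [], [], []
--     mapped = [note_to_int[note] for note, _dur in all_notes_durations]
--     inputs = [mapped[i:i + sequence_length] for i in range(n - sequence_length)]
--     outputs_pitch = mapped[sequence_length:]
--     outputs_dur = [duration_to_int[str(dur)] for _note, dur in all_notes_durations[sequence_length:]]
--     return inputs, outputs_pitch, outputs_dur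
-- ===== Notes on version B (the rewrite author's own statement) =====
-- stated objective: simpler
-- what changed: B maps every note to its int in one pass, then builds inputs as slices of that pre-mapped list and both output lists as a single tail slice/comprehension, instead of re-mapping inside each window and indexing per iteration.
-- outside the precondition, e.g. on prepare_sequences([('', '')], -1, {'': 0}, {'': 0}): A returns ([[], []], [0, 0], [0, 0]), B returns ([], [], [])
import Mathlib
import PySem

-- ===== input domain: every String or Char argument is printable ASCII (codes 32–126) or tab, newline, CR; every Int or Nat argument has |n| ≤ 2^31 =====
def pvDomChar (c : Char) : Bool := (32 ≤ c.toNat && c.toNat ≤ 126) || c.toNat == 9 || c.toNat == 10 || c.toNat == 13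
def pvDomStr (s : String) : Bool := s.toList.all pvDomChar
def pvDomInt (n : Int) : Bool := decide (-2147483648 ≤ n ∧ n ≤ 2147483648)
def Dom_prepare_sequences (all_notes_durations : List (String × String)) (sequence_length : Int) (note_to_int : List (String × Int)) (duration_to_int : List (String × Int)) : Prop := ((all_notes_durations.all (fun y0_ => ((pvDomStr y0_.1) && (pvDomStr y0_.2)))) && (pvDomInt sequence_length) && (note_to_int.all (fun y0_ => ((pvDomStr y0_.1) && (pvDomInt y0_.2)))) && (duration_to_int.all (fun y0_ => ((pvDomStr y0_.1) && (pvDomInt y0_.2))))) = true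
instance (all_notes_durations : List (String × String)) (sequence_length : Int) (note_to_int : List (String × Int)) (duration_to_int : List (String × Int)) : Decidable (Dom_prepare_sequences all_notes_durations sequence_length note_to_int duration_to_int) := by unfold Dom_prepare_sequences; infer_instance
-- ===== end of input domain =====

-- B maps notes to ints once, then takes slices of the pre-mapped list; simpler decomposition, same cost.

-- ===== PORT A =====
-- Literal transliteration of A: one loop over range(len - seq_len) appending to three accumulators.
def prepare_sequences (all_notes_durations : List (String × String)) (sequence_length : Int) (note_to_int : List (String × Int)) (duration_to_int : List (String × Int)) : List (List Int) × List Int × List Int :=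
  (PySem.List.pyRange 0 ((all_notes_durations.length : Int) - sequence_length) 1).foldl
    (fun (st : List (List Int) × List Int × List Int) i =>
      let seq_in := PySem.List.slice all_notes_durations (some i) (some (i + sequence_length))
      let seq_out := PySem.List.pyGetD all_notes_durations (i + sequence_length) ("", "")
      (st.1 ++ [seq_in.map (fun p => (List.lookup p.1 note_to_int).getD 0)],
       st.2.1 ++ [(List.lookup seq_out.1 note_to_int).getD 0],
       st.2.2 ++ [(List.lookup seq_out.2 duration_to_int).getD 0]))
    ([], [], [])

-- ===== PORT B =====
-- Literal transliteration of B: guard, one mapping pass, then slices of the mapped list.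
def prepare_sequences_alt (all_notes_durations : List (String × String)) (sequence_length : Int) (note_to_int : List (String × Int)) (duration_to_int : List (String × Int)) : List (List Int) × List Int × List Int :=
  let n : Int := all_notes_durations.length
  if sequence_length < 0 ∨ n ≤ sequence_length then ([], [], [])
  else
    let mapped := all_notes_durations.map (fun p => (List.lookup p.1 note_to_int).getD 0)
    ((PySem.List.pyRange 0 (n - sequence_length) 1).map
        (fun i => PySem.List.slice mapped (some i) (some (i + sequence_length))),
     PySem.List.slice mapped (some sequence_length) none,
     (PySem.List.slice all_notes_durations (some sequence_length) none).map
        (fun p => (List.lookup p.2 duration_to_int).getD 0))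

-- ===== PRECONDITION & SPEC =====
-- Pre_ excludes (a) negative sequence_length — outside the natural domain of window sizes; there A mixes
-- negative-slice and wraparound indexing (an artefact) while B slices — and (b) inputs where a dict lookup
-- raises KeyError in Python (a note missing from note_to_int, or a duration at index ≥ sequence_length
-- missing from duration_to_int, when any window exists); both Pythons raise on exactly those.
def Pre_prepare_sequences (all_notes_durations : List (String × String)) (sequence_length : Int) (note_to_int : List (String × Int)) (duration_to_int : List (String × Int)) : Prop :=
  0 ≤ sequence_length ∧
  (sequence_length < (all_notes_durations.length : Int) →
    (∀ p ∈ all_notes_durations, (List.lookup p.1 note_to_int).isSome) ∧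
    (∀ p ∈ all_notes_durations.drop sequence_length.toNat, (List.lookup p.2 duration_to_int).isSome))
instance (all_notes_durations : List (String × String)) (sequence_length : Int) (note_to_int : List (String × Int)) (duration_to_int : List (String × Int)) : Decidable (Pre_prepare_sequences all_notes_durations sequence_length note_to_int duration_to_int) := by unfold Pre_prepare_sequences; infer_instance

def pvWitness_prepare_sequences : (List (String × String)) × Int × (List (String × Int)) × (List (String × Int)) :=
  ([("a", "q"), ("b", "q"), ("a", "r")], 1, [("a", 0), ("b", 1)], [("q", 5), ("r", 7)])

def Spec_prepare_sequences (all_notes_durations : List (String × String)) (sequence_length : Int) (note_to_int : List (String × Int)) (duration_to_int : List (String × Int)) (out : List (List Int) × List Int × List Int) : Prop := out = prepare_sequences_alt all_notes_durations sequence_length note_to_int duration_to_int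
instance (all_notes_durations : List (String × String)) (sequence_length : Int) (note_to_int : List (String × Int)) (duration_to_int : List (String × Int)) (out : List (List Int) × List Int × List Int) : Decidable (Spec_prepare_sequences all_notes_durations sequence_length note_to_int duration_to_int out) := by unfold Spec_prepare_sequences; infer_instance

-- ===== CLAIM (what is proved, stated in full; the proofs are below) =====
def Claim_equal_prepare_sequences : Prop := ∀ (all_notes_durations : List (String × String)) (sequence_length : Int) (note_to_int : List (String × Int)) (duration_to_int : List (String × Int)), Dom_prepare_sequences all_notes_durations sequence_length note_to_int duration_to_int → Pre_prepare_sequences all_notes_durations sequence_length note_to_int duration_to_int → Spec_prepare_sequences all_notes_durations sequence_length note_to_int duration_to_int (prepare_sequences all_notes_durations sequence_length note_to_int duration_to_int)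

-- ===== LEMMAS AND PROOFS =====

-- A fold that appends one element to each of three accumulators is the triple of maps.
theorem pv_foldl_triple {α β γ δ : Type} (l : List α) (f : α → β) (g : α → γ) (h : α → δ)
    (a : List β) (b : List γ) (c : List δ) :
    l.foldl (fun st x => (st.1 ++ [f x], st.2.1 ++ [g x], st.2.2 ++ [h x])) (a, b, c)
      = (a ++ l.map f, b ++ l.map g, c ++ l.map h) := by
  induction l generalizing a b c with
  | nil => simp
  | cons x xs ih => simp [ih]

-- Re-indexing a window loop: mapping F over range(0, b-a) at offset a is mapping F over range(a, b).
theorem pv_map_pyRange_shift {β : Type} (F : Int → β) (a b : Int) :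
    (PySem.List.pyRange 0 (b - a) 1).map (fun i => F (i + a))
      = (PySem.List.pyRange a b 1).map F := by
  rw [PySem.List.pyRange_one, PySem.List.pyRange_one, List.map_map, List.map_map]
  simp only [Int.sub_zero]
  apply List.map_congr_left
  intro k _
  simp [Function.comp]
  congr 1
  ring

-- slice commutes with map (all bounds nonnegative; parity of lengths keeps it exact).
theorem pv_slice_map {α β : Type} (l : List α) (f : α → β) (i j : Int) (hi : 0 ≤ i) (hj : 0 ≤ j) :
    PySem.List.slice (l.map f) (some i) (some j)
      = (PySem.List.slice l (some i) (some j)).map f := by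
  rw [PySem.List.slice_toNat _ hi hj, PySem.List.slice_toNat _ hi hj]
  simp

theorem prepare_sequences_spec : Claim_equal_prepare_sequences := by
  intro all L n2i d2i _hdom hpre
  obtain ⟨hL, _⟩ := hpre
  unfold Spec_prepare_sequences prepare_sequences prepare_sequences_alt
  by_cases hle : (all.length : Int) ≤ L
  · rw [PySem.List.pyRange_one_eq_nil (by omega)]
    simp only [List.foldl_nil]
    rw [if_pos (Or.inr hle)]
  · rw [if_neg (by omega : ¬ (L < 0 ∨ (all.length : Int) ≤ L))]
    rw [pv_foldl_triple (PySem.List.pyRange 0 ((all.length : Int) - L) 1)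
      (fun i => (PySem.List.slice all (some i) (some (i + L))).map (fun p => (List.lookup p.1 n2i).getD 0))
      (fun i => (List.lookup (PySem.List.pyGetD all (i + L) ("", "")).1 n2i).getD 0)
      (fun i => (List.lookup (PySem.List.pyGetD all (i + L) ("", "")).2 d2i).getD 0)]
    simp only [List.nil_append]
    refine Prod.ext ?_ (Prod.ext ?_ ?_)
    · -- inputs component
      apply List.map_congr_left
      intro i hi
      rw [PySem.List.mem_pyRange_one] at hi
      rw [pv_slice_map all _ i (i + L) hi.1 (by omega)]
    · -- pitch component
      show _ = PySem.List.slice (all.map fun p => (List.lookup p.1 n2i).getD 0) (some L) none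
      rw [PySem.List.slice_from _ hL]
      rw [pv_map_pyRange_shift (fun j => (List.lookup (PySem.List.pyGetD all j ("", "")).1 n2i).getD 0) L (all.length : Int)]
      rw [show (fun j => (List.lookup (PySem.List.pyGetD all j ("", "")).1 n2i).getD 0)
            = (fun p : String × String => (List.lookup p.1 n2i).getD 0) ∘ (fun j => PySem.List.pyGetD all j ("", "")) from rfl]
      rw [← List.map_map, PySem.List.map_pyGetD_pyRange' all ("", "") hL]
      simp
    · -- duration component
      show _ = (PySem.List.slice all (some L) none).map fun p => (List.lookup p.2 d2i).getD 0
      rw [PySem.List.slice_from _ hL]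
      rw [pv_map_pyRange_shift (fun j => (List.lookup (PySem.List.pyGetD all j ("", "")).2 d2i).getD 0) L (all.length : Int)]
      rw [show (fun j => (List.lookup (PySem.List.pyGetD all j ("", "")).2 d2i).getD 0)
            = (fun p : String × String => (List.lookup p.2 d2i).getD 0) ∘ (fun j => PySem.List.pyGetD all j ("", "")) from rfl]
      rw [← List.map_map, PySem.List.map_pyGetD_pyRange' all ("", "") hL]
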